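-- pv_equiv track=rewrite | github.com/WanLingLin595/Matroidal-Connectivity | BCube.py | switches
-- ===== SOURCE A (Python) =====
-- def ten2x(n, x, l): # n: a decimal number    x: x-bit    l: the length of string
--     a = ['0','1','2','3','4','5','6','7','8','9','A','B','C','D','E','F','G','H','I','J','K','L','M','N','O','P','Q','R','S','T','U','V']
--     b = []
--     while True:
--         s = n // x
--         y = n % x
--         b = b + [y]
--         if s == 0:
--             break
--         n = s
--     nt = []
--     for i in b:
--         nt.append(a[i])
--     for i in range(l-len(nt)):
--         nt.append('0')
--     nt.reverse()
--     return "".join(nt)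
--
-- def switches(n, k):
--     adss = []
--     if k == 1:
--         adss = []
--         for i in range(k+1):
--             ads = []
--             for j in range(n):
--                 vertex = ten2x(i, n, 1) + ten2x(j, n, 1) + 's'
--                 ads.append(vertex)
--             adss.append(ads)
--     if k == 2:
--         adss = []
--         for i in range(k+1):
--             ads = []
--             for j in range(n):
--                 ver = ten2x(i, n, 1) + ten2x(j, n, 1)
--                 for ii in range(n):
--                     v_d = ver + ten2x(ii, n, 1) + 's'
--                     ads.append(v_d)
--             adss.append(ads)
--
--     if k == 3:
--         adss = []
--         for i in range(k + 1):
--             ads = []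
--             for j in range(n):
--                 ver = ten2x(i, n, 1) + ten2x(j, n, 1)
--                 for ii in range(n):
--                     v_d = ver + ten2x(ii, n, 1)
--                     for jj in range(n):
--                         v_g = v_d + ten2x(jj, n, 1) + 's'
--                         ads.append(v_g)
--             adss.append(ads)
--
--     if k == 4:
--         adss = []
--         for i in range(k + 1):
--             ads = []
--             for j in range(n):
--                 ver = ten2x(i, n, 1) + ten2x(j, n, 1)
--                 for ii in range(n):
--                     v_d = ver + ten2x(ii, n, 1)
--                     for jj in range(n):
--                         v_g = v_d + ten2x(jj, n, 1)
--                         for jjj in range(n):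
--                             v_final = v_g + ten2x(jjj, n, 1) + 's'
--                             ads.append(v_final)
--             adss.append(ads)
--
--     return adss
-- ===== SOURCE B (Python) =====
-- _DIGITS = "0123456789ABCDEFGHIJKLMNOPQRSTUV"
--
-- def _rep(m, base):
--     # base-`base` representation of m, most-significant digit first
--     s = ""
--     while True:
--         s = _DIGITS[m % base] + s
--         m //= base
--         if m == 0:
--             return s
--
-- def switches(n, k):
--     if k not in (1, 2, 3, 4):
--         return []
--     # build the shared k-digit suffix pool once by staged expansion,
--     # then prepend each level's prefix to the same pool
--     digits = _DIGITS[:max(n, 0)]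
--     suffixes = [""]
--     for _ in range(k):
--         suffixes = [s + c for s in suffixes for c in digits]
--     return [[_rep(i, n) + s + "s" for s in suffixes] for i in range(k + 1)]
-- ===== Notes on version B (the rewrite author's own statement) =====
-- stated objective: alternative
-- what changed: B replaces A's four duplicated per-k nested-loop branches (which recompute ten2x for every digit of every address in every row) by a guard plus a staged expansion that builds the k-digit suffix pool ONCE (suffixes = [s+c ...] repeated k times over the digit table) and then prepends each row's base-n prefix to that shared pool; the digit helper builds its string most-significant-first by prepending.
import Mathlib
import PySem

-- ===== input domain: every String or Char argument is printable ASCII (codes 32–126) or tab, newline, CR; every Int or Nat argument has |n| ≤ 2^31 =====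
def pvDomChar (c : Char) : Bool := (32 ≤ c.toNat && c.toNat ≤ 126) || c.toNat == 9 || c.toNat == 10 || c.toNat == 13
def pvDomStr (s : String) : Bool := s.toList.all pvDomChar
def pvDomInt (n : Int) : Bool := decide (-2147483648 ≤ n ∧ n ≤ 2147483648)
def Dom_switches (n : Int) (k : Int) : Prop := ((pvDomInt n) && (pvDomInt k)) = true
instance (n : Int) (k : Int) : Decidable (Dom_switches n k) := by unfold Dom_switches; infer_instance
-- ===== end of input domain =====

-- B replaces A's four duplicated nested-loop branches by one guard plus a staged expansion that
-- builds the shared k-digit suffix pool once and prepends each row's prefix (objective: alternative).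
-- Python strings are carried as List Char and wrapped with String.ofList at the end
-- (String.ofList/String.toList are mutually inverse, and Python's str '+' is append of the char lists); exact.

-- ===== PORT A =====
-- the table a = ['0',...,'V'] (each Python string of length 1 as a List Char)
def pvDigitsA : List (List Char) :=
  [['0'],['1'],['2'],['3'],['4'],['5'],['6'],['7'],['8'],['9'],
   ['A'],['B'],['C'],['D'],['E'],['F'],['G'],['H'],['I'],['J'],
   ['K'],['L'],['M'],['N'],['O'],['P'],['Q'],['R'],['S'],['T'],['U'],['V']]

-- ten2x's 'while True' loop; fuel n.toNat+1 suffices on every input A returns on (0 ≤ n, 2 ≤ x)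
def ten2xLoop : Nat → Int → Int → List Int → List Int
  | 0, _, _, b => b
  | f+1, n, x, b =>
    let s := PySem.Int.floordiv n x
    let y := PySem.Int.mod n x
    let b' := b ++ [y]
    if s = 0 then b' else ten2xLoop f s x b'

-- ten2x returns a Python str, carried as List Char; callers wrap with String.ofList
def ten2xChars (n x l : Int) : List Char :=
  let b := ten2xLoop (n.toNat + 1) n x []
  let nt := b.map (fun i => (PySem.List.pyGet? pvDigitsA i).getD [])  -- a[i]; none = IndexError, outside Pre_
  let nt := nt ++ List.replicate (l - (nt.length : Int)).toNat ['0']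
  PySem.Chars.join [] nt.reverse

def switches (n : Int) (k : Int) : List (List String) :=
  let adss : List (List String) := []
  let adss := if k = 1 then
      (PySem.List.pyRange 0 (k+1) 1).map (fun i =>
        (PySem.List.pyRange 0 n 1).map (fun j =>
          String.ofList ((ten2xChars i n 1 ++ ten2xChars j n 1) ++ ['s'])))
    else adss
  let adss := if k = 2 then
      (PySem.List.pyRange 0 (k+1) 1).map (fun i =>
        (PySem.List.pyRange 0 n 1).flatMap (fun j =>
          (PySem.List.pyRange 0 n 1).map (fun ii =>
            String.ofList (((ten2xChars i n 1 ++ ten2xChars j n 1) ++ ten2xChars ii n 1) ++ ['s']))))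
    else adss
  let adss := if k = 3 then
      (PySem.List.pyRange 0 (k+1) 1).map (fun i =>
        (PySem.List.pyRange 0 n 1).flatMap (fun j =>
          (PySem.List.pyRange 0 n 1).flatMap (fun ii =>
            (PySem.List.pyRange 0 n 1).map (fun jj =>
              String.ofList ((((ten2xChars i n 1 ++ ten2xChars j n 1) ++ ten2xChars ii n 1) ++ ten2xChars jj n 1) ++ ['s'])))))
    else adss
  let adss := if k = 4 then
      (PySem.List.pyRange 0 (k+1) 1).map (fun i =>
        (PySem.List.pyRange 0 n 1).flatMap (fun j =>
          (PySem.List.pyRange 0 n 1).flatMap (fun ii =>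
            (PySem.List.pyRange 0 n 1).flatMap (fun jj =>
              (PySem.List.pyRange 0 n 1).map (fun jjj =>
                String.ofList (((((ten2xChars i n 1 ++ ten2xChars j n 1) ++ ten2xChars ii n 1) ++ ten2xChars jj n 1) ++ ten2xChars jjj n 1) ++ ['s']))))))
    else adss
  adss

-- ===== PORT B =====
-- _DIGITS, a Python str carried as List Char
def pvDigitsB : List Char :=
  ['0','1','2','3','4','5','6','7','8','9','A','B','C','D','E','F',
   'G','H','I','J','K','L','M','N','O','P','Q','R','S','T','U','V']

-- _rep's 'while True' loop; fuel m.toNat+1 suffices on every input B returns on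
def repLoop : Nat → Int → Int → List Char → List Char
  | 0, _, _, s => s
  | f+1, m, base, s =>
    let s' := (PySem.List.pyGet? pvDigitsB (PySem.Int.mod m base)).getD ' ' :: s
    let m' := PySem.Int.floordiv m base
    if m' = 0 then s' else repLoop f m' base s'

-- _rep returns a Python str, carried as List Char
def repChars (m base : Int) : List Char := repLoop (m.toNat + 1) m base []

def switches_alt (n : Int) (k : Int) : List (List String) :=
  if k = 1 ∨ k = 2 ∨ k = 3 ∨ k = 4 then
    let digits := PySem.List.slice pvDigitsB none (some (max n 0))   -- _DIGITS[:max(n, 0)]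
    let suffixes := (PySem.List.pyRange 0 k 1).foldl
        (fun sufs _ => sufs.flatMap (fun s => digits.map (fun c => s ++ [c]))) [[]]
    (PySem.List.pyRange 0 (k+1) 1).map (fun i =>
      suffixes.map (fun s => String.ofList (repChars i n ++ s ++ ['s'])))
  else []

-- ===== PRECONDITION & SPEC =====
-- Pre_ excludes, for k in 1..4 only, n = 1 (ten2x loops forever: n //= 1 never shrinks) and
-- n ≥ 33 (a[i] raises IndexError: the digit table has 32 symbols); A returns everywhere else.
def Pre_switches (n : Int) (k : Int) : Prop :=
  (k = 1 ∨ k = 2 ∨ k = 3 ∨ k = 4) → (n ≤ 0 ∨ (2 ≤ n ∧ n ≤ 32))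
instance (n : Int) (k : Int) : Decidable (Pre_switches n k) := by unfold Pre_switches; infer_instance
def pvWitness_switches : Int × Int := (3, 2)

def Spec_switches (n : Int) (k : Int) (out : List (List String)) : Prop := out = switches_alt n k
instance (n : Int) (k : Int) (out : List (List String)) : Decidable (Spec_switches n k out) := by unfold Spec_switches; infer_instance

-- ===== CLAIM (what is proved, stated in full; the proofs are below) =====
def Claim_equal_switches : Prop := ∀ (n : Int) (k : Int), Dom_switches n k → Pre_switches n k → Spec_switches n k (switches n k)

-- ===== LEMMAS AND PROOFS =====

theorem ten2xLoop_acc (f : Nat) : ∀ (m x : Int) (b : List Int),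
    ten2xLoop f m x b = b ++ ten2xLoop f m x [] := by
  induction f with
  | zero => intro m x b; simp [ten2xLoop]
  | succ f ih =>
    intro m x b
    simp only [ten2xLoop]
    split
    · simp
    · rw [ih _ _ (b ++ _), ih _ _ ([] ++ _)]
      simp

theorem ten2xLoop_ne_nil (f : Nat) (m x : Int) : ten2xLoop (f+1) m x [] ≠ [] := by
  simp only [ten2xLoop]
  split
  · simp
  · rw [ten2xLoop_acc]
    simp

theorem mem_ten2xLoop (f : Nat) : ∀ (m x : Int) (b : List Int), 0 < x →
    (∀ a ∈ b, 0 ≤ a ∧ a < x) → ∀ a ∈ ten2xLoop f m x b, 0 ≤ a ∧ a < x := by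
  induction f with
  | zero => intro m x b _ hb; simpa [ten2xLoop] using hb
  | succ f ih =>
    intro m x b hx hb a ha
    have hb' : ∀ a ∈ b ++ [PySem.Int.mod m x], 0 ≤ a ∧ a < x := by
      intro a ha
      rcases List.mem_append.mp ha with h | h
      · exact hb a h
      · have he : a = PySem.Int.mod m x := by simpa using h
        subst he
        exact ⟨PySem.Int.mod_nonneg m hx, PySem.Int.mod_lt m hx⟩
    simp only [ten2xLoop] at ha
    split at ha
    · exact hb' a ha
    · exact ih _ _ _ hx hb' a ha

def gB (i : Int) : Char := (PySem.List.pyGet? pvDigitsB i).getD ' '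

theorem dig_eq (y : Int) (h0 : 0 ≤ y) (h32 : y < 32) :
    (PySem.List.pyGet? pvDigitsA y).getD [] = [gB y] := by
  obtain ⟨yn, rfl⟩ := Int.eq_ofNat_of_zero_le h0
  have hy : yn < 32 := by exact_mod_cast h32
  unfold gB
  interval_cases yn <;> rfl

theorem repLoop_eq (n : Int) (hn2 : 2 ≤ n) (f : Nat) :
    ∀ (m : Int) (s0 : List Char), 0 ≤ m → m.toNat < f →
    repLoop f m n s0 = (ten2xLoop f m n []).reverse.map gB ++ s0 := by
  induction f with
  | zero => intro m s0 _ h; omega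
  | succ f ih =>
    intro m s0 hm hf
    have hnpos : (0:Int) < n := by omega
    simp only [repLoop, ten2xLoop]
    by_cases h0 : PySem.Int.floordiv m n = 0
    · simp [h0, gB]
    · rw [if_neg h0, if_neg h0]
      have hq0 : 0 ≤ PySem.Int.floordiv m n :=
        (PySem.Int.le_floordiv_iff_mul_le hnpos).mpr (by simpa using hm)
      have hm1 : 1 ≤ m := by
        rcases lt_or_eq_of_le hm with h | h
        · omega
        · exfalso
          apply h0
          rw [PySem.Int.floordiv_eq_ediv_of_pos hnpos, ← h]
          simp
      have hqlt : PySem.Int.floordiv m n < m := by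
        rw [PySem.Int.floordiv_lt_iff_lt_mul hnpos]
        nlinarith
      have hfuel : (PySem.Int.floordiv m n).toNat < f := by omega
      rw [ih _ _ hq0 hfuel, ten2xLoop_acc f _ _ ([] ++ _)]
      simp [gB]

theorem ten2xChars_eq_repChars (n m : Int) (hn2 : 2 ≤ n) (hn32 : n ≤ 32) (hm : 0 ≤ m) :
    ten2xChars m n 1 = repChars m n := by
  unfold ten2xChars repChars
  set b := ten2xLoop (m.toNat + 1) m n [] with hb
  have hbne : b ≠ [] := ten2xLoop_ne_nil _ _ _
  have hlen : 0 < b.length := List.length_pos_of_ne_nil hbne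
  have hpad : ((1 : Int) - ((b.map (fun i => (PySem.List.pyGet? pvDigitsA i).getD [])).length : Int)).toNat = 0 := by
    simp only [List.length_map]
    omega
  simp only [hpad, List.replicate_zero, List.append_nil]
  have hmemb : ∀ a ∈ b, 0 ≤ a ∧ a < n :=
    mem_ten2xLoop _ _ _ _ (by omega) (by simp)
  have hmap : b.map (fun i => (PySem.List.pyGet? pvDigitsA i).getD []) = (b.map gB).map (fun c => [c]) := by
    rw [List.map_map]
    apply List.map_congr_left
    intro a ha
    have h := hmemb a ha
    exact dig_eq a h.1 (by omega)
  rw [hmap, ← List.map_reverse, PySem.Chars.join_nil_singletons,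
      repLoop_eq n hn2 _ _ _ hm (by omega), ← hb, List.map_reverse]
  simp

-- for a digit below the base, _rep returns the single table character
theorem repChars_lt (n j : Int) (hn : 0 < n) (h0 : 0 ≤ j) (hj : j < n) :
    repChars j n = [gB j] := by
  unfold repChars
  have hq : PySem.Int.floordiv j n = 0 := by
    rw [PySem.Int.floordiv_eq_ediv_of_pos hn]
    exact Int.ediv_eq_zero_of_lt h0 hj
  have hr : PySem.Int.mod j n = j := by
    rw [PySem.Int.mod_eq_emod_of_pos hn]
    exact Int.emod_eq_of_lt h0 hj
  simp [repLoop, hq, hr, gB]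

-- the A-side nested loops over a fixed prefix, as one recursive shape
def nestA (n : Int) (pre : List Char) : Nat → List String
  | 0 => [String.ofList (pre ++ ['s'])]
  | d+1 => (PySem.List.pyRange 0 n 1).flatMap (fun j => nestA n (pre ++ ten2xChars j n 1) d)

theorem flatMap_congr_mem {α β : Type} (l : List α) (f g : α → List β)
    (h : ∀ a ∈ l, f a = g a) : l.flatMap f = l.flatMap g := by
  induction l with
  | nil => rfl
  | cons x xs ih =>
    simp only [List.flatMap_cons]
    rw [h x (by simp), ih (fun a ha => h a (by simp [ha]))]

theorem flatMap_single {α β : Type} (l : List α) (f : α → β) :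
    l.flatMap (fun x => [f x]) = l.map f := by
  induction l with
  | nil => rfl
  | cons x xs ih => simp [List.flatMap_cons, ih]

-- B's one expansion stage, and the suffix pool after d stages
def stageE (digits : List Char) (L : List (List Char)) : List (List Char) :=
  L.flatMap (fun s => digits.map (fun c => s ++ [c]))

def sufPool (digits : List Char) (d : Nat) : List (List Char) := (stageE digits)^[d] [[]]

theorem foldl_const_iterate {α β : Type} (f : α → α) : ∀ (l : List β) (init : α),
    l.foldl (fun a _ => f a) init = f^[l.length] init := by
  intro l
  induction l with
  | nil => intro init; simp
  | cons x xs ih => intro init; simp [List.foldl_cons, ih, Function.iterate_succ_apply]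

theorem stageE_iter_distrib (digits : List Char) : ∀ (d : Nat) (L : List (List Char)),
    (stageE digits)^[d] L = L.flatMap (fun w => (sufPool digits d).map (fun s => w ++ s)) := by
  intro d
  induction d with
  | zero =>
    intro L
    simp [sufPool]
  | succ d ih =>
    intro L
    rw [Function.iterate_succ_apply, ih (stageE digits L)]
    have hS : sufPool digits (d+1) = digits.flatMap (fun c => (sufPool digits d).map (fun s => c :: s)) := by
      show (stageE digits)^[d+1] [[]] = _
      rw [Function.iterate_succ_apply, ih (stageE digits [[]])]
      simp [stageE, sufPool, List.flatMap_map]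
    rw [hS]
    simp only [stageE, List.flatMap_assoc, List.map_flatMap, List.flatMap_map, List.map_map]
    apply flatMap_congr_mem
    intro w _
    apply flatMap_congr_mem
    intro c _
    apply List.map_congr_left
    intro t _
    simp [Function.comp, List.append_assoc]

theorem sufPool_succ (digits : List Char) (d : Nat) :
    sufPool digits (d+1) = digits.flatMap (fun c => (sufPool digits d).map (fun s => c :: s)) := by
  show (stageE digits)^[d+1] [[]] = _
  rw [Function.iterate_succ_apply, stageE_iter_distrib digits d (stageE digits [[]])]
  simp [stageE, sufPool, List.flatMap_map]

-- A's nested loops equal a map over B's suffix pool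
theorem nestA_eq_pool (n : Int) (hT : ∀ j ∈ PySem.List.pyRange 0 n 1, ten2xChars j n 1 = [gB j]) :
    ∀ (d : Nat) (pre : List Char),
    nestA n pre d = (sufPool ((PySem.List.pyRange 0 n 1).map gB) d).map
      (fun s => String.ofList (pre ++ s ++ ['s'])) := by
  intro d
  induction d with
  | zero =>
    intro pre
    rw [show sufPool ((PySem.List.pyRange 0 n 1).map gB) 0 = [[]] from rfl]
    simp [nestA]
  | succ d ih =>
    intro pre
    rw [sufPool_succ]
    simp only [nestA, List.map_flatMap, List.flatMap_map, List.map_map]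
    apply flatMap_congr_mem
    intro j hj
    rw [hT j hj, ih (pre ++ [gB j])]
    apply List.map_congr_left
    intro s _
    simp [Function.comp, List.append_assoc]

theorem switches_k1 (n : Int) : switches n 1 =
    (PySem.List.pyRange 0 2 1).map (fun i => nestA n (ten2xChars i n 1) 1) := by
  simp [switches, nestA, flatMap_single]

theorem switches_k2 (n : Int) : switches n 2 =
    (PySem.List.pyRange 0 3 1).map (fun i => nestA n (ten2xChars i n 1) 2) := by
  simp [switches, nestA, flatMap_single]

theorem switches_k3 (n : Int) : switches n 3 =
    (PySem.List.pyRange 0 4 1).map (fun i => nestA n (ten2xChars i n 1) 3) := by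
  simp [switches, nestA, flatMap_single]

theorem switches_k4 (n : Int) : switches n 4 =
    (PySem.List.pyRange 0 5 1).map (fun i => nestA n (ten2xChars i n 1) 4) := by
  simp [switches, nestA, flatMap_single]

theorem pyRange_nil_of_nonpos (n : Int) (hn : n ≤ 0) : PySem.List.pyRange 0 n 1 = [] := by
  rw [PySem.List.pyRange_one]
  have h0 : (n - 0).toNat = 0 := by omega
  rw [h0]
  simp

-- _DIGITS[:max(n,0)] is exactly the table characters of the digits 0..n-1
theorem digits_slice_eq (n : Int) (h2 : 2 ≤ n) (h32 : n ≤ 32) :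
    PySem.List.slice pvDigitsB none (some (max n 0)) = (PySem.List.pyRange 0 n 1).map gB := by
  interval_cases n <;> decide

theorem sufPool_nil (d : Nat) : sufPool [] (d+1) = [] := by
  induction d with
  | zero => decide
  | succ d ih =>
    rw [sufPool_succ] at ih ⊢
    simp

theorem switches_eq_alt (n k : Int) (hpre : Pre_switches n k) : switches n k = switches_alt n k := by
  by_cases hk : k = 1 ∨ k = 2 ∨ k = 3 ∨ k = 4
  · have hn := hpre hk
    have halt : switches_alt n k =
        (PySem.List.pyRange 0 (k+1) 1).map (fun i =>
          (sufPool (PySem.List.slice pvDigitsB none (some (max n 0))) k.toNat).map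
            (fun s => String.ofList (repChars i n ++ s ++ ['s']))) := by
      simp only [switches_alt, if_pos hk]
      rw [foldl_const_iterate, PySem.List.length_pyRange_one]
      have : (k - 0).toNat = k.toNat := by omega
      rw [this]
      rfl
    rcases hn with hneg | hpos
    · -- n ≤ 0: every row is empty on both sides
      have hr : PySem.List.pyRange 0 n 1 = [] := pyRange_nil_of_nonpos n hneg
      have hdig : PySem.List.slice pvDigitsB none (some (max n 0)) = [] := by
        have hm : max n 0 = ((0:Nat):Int) := by simp; omega
        rw [hm, PySem.List.slice_to_natCast]
        simp
      rw [halt, hdig]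
      have hpool : ∀ d : Nat, 0 < d → sufPool ([] : List Char) d = [] := by
        intro d hd
        cases d with
        | zero => omega
        | succ d => exact sufPool_nil d
      have hnest : ∀ (pre : List Char) (d : Nat), nestA n pre (d+1) = [] := by
        intro pre d
        simp [nestA, hr]
      rcases hk with rfl | rfl | rfl | rfl
      · rw [switches_k1]; apply List.map_congr_left; intro i _
        rw [hnest _ 0, hpool (Int.toNat 1) (by decide)]; rfl
      · rw [switches_k2]; apply List.map_congr_left; intro i _
        rw [hnest _ 1, hpool (Int.toNat 2) (by decide)]; rfl
      · rw [switches_k3]; apply List.map_congr_left; intro i _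
        rw [hnest _ 2, hpool (Int.toNat 3) (by decide)]; rfl
      · rw [switches_k4]; apply List.map_congr_left; intro i _
        rw [hnest _ 3, hpool (Int.toNat 4) (by decide)]; rfl
    · -- 2 ≤ n ≤ 32
      obtain ⟨h2, h32⟩ := hpos
      have hT : ∀ j ∈ PySem.List.pyRange 0 n 1, ten2xChars j n 1 = [gB j] := by
        intro j hj
        rw [PySem.List.mem_pyRange_one] at hj
        rw [ten2xChars_eq_repChars n j h2 h32 hj.1]
        exact repChars_lt n j (by omega) hj.1 hj.2
      have hrow : ∀ (kd : Nat) (m : Int),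
          (PySem.List.pyRange 0 m 1).map (fun i => nestA n (ten2xChars i n 1) kd) =
          (PySem.List.pyRange 0 m 1).map (fun i =>
            (sufPool (PySem.List.slice pvDigitsB none (some (max n 0))) kd).map
              (fun s => String.ofList (repChars i n ++ s ++ ['s']))) := by
        intro kd m
        apply List.map_congr_left
        intro i hi
        rw [PySem.List.mem_pyRange_one] at hi
        rw [nestA_eq_pool n hT kd, digits_slice_eq n h2 h32,
            ten2xChars_eq_repChars n i h2 h32 hi.1]
      rw [halt]
      rcases hk with rfl | rfl | rfl | rfl
      · rw [switches_k1]; exact hrow 1 2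
      · rw [switches_k2]; exact hrow 2 3
      · rw [switches_k3]; exact hrow 3 4
      · rw [switches_k4]; exact hrow 4 5
  · push Not at hk
    obtain ⟨h1, h2, h3, h4⟩ := hk
    simp [switches, switches_alt, h1, h2, h3, h4]

-- ===== VERDICT (by name: the statement is the Claim_ definition above) =====
theorem switches_spec : Claim_equal_switches := by
  intro n k _ hpre
  unfold Spec_switches
  exact switches_eq_alt n k hpre
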